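-- pv_equiv track=rewrite | github.com/HuygensING/republic-project | republic/helper/utils.py | one_match
-- ===== SOURCE A (Python) =====
-- def one_match(matchgrp):
--     """returns one (hopefully the  best) match from a list of matches"""
--     gr = {}
--     for sr in matchgrp:
--         if gr.get(sr[1]):
--             gr[sr[1]].append(sr)
--         else:
--             gr[sr[1]] = [sr]
--     for key in gr.keys():
--         nw = min(gr[key], key=lambda x: x[2])
--         gr[key] = nw
--     return gr
-- ===== SOURCE B (Python) =====
-- def one_match(matchgrp):
--     """returns one (hopefully the  best) match from a list of matches"""
--     best = {}
--     for sr in matchgrp: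
--         cur = best.get(sr[1])
--         if cur is None or sr[2] < cur[2]:
--             best[sr[1]] = sr
--     return best
-- ===== Notes on version B (the rewrite author's own statement) =====
-- stated objective: simpler
-- what changed: Single pass keeping only the best match per key in a dict (strict < replacement), instead of grouping all matches into per-key lists and a second loop taking min over each list.
import Mathlib
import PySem

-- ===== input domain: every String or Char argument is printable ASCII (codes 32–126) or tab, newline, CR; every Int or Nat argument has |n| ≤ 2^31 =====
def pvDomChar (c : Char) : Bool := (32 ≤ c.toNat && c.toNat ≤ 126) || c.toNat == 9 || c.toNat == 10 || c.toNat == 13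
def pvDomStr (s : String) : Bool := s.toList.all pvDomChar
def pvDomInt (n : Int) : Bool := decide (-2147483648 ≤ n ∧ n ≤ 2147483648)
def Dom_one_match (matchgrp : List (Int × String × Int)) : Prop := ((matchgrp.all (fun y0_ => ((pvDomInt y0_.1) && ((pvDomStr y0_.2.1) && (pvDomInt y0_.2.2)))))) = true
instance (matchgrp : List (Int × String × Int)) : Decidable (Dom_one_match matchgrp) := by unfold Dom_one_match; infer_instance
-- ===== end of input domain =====

-- B replaces A's group-into-lists-then-min-per-key with a single pass keeping only the best match per key (strict < replacement); same O(n) cost, simpler.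


-- ===== PORT A =====
-- min(l, key=lambda x: x[2]); the getD default is never reached (A only applies it to nonempty group lists)
def pvMinBy (l : List (Int × String × Int)) : Int × String × Int :=
  (PySem.List.min? l (fun x => x.2.2)).getD (0, "", 0)

-- body of A's first loop: truthy gr.get(sr[1]) (non-None and nonempty) appends, else starts a new list
def pvStepA (gr : PySem.Dict String (List (Int × String × Int))) (sr : Int × String × Int) :
    PySem.Dict String (List (Int × String × Int)) :=
  if gr.getD sr.2.1 [] ≠ [] then gr.insert sr.2.1 (gr.getD sr.2.1 [] ++ [sr])
  else gr.insert sr.2.1 [sr]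

def one_match (matchgrp : List (Int × String × Int)) : List (String × Int × String × Int) :=
  let gr := matchgrp.foldl pvStepA PySem.Dict.empty
  -- second loop: for key in gr.keys(): gr[key] = min(gr[key], key=lambda x: x[2])  (in-place, order kept)
  (gr.items.map (fun p => (p.1, pvMinBy p.2)))

-- ===== PORT B =====
def pvStepB (best : PySem.Dict String (Int × String × Int)) (sr : Int × String × Int) :
    PySem.Dict String (Int × String × Int) :=
  match best.get? sr.2.1 with
  | none => best.insert sr.2.1 sr
  | some cur => if sr.2.2 < cur.2.2 then best.insert sr.2.1 sr else best

def one_match_alt (matchgrp : List (Int × String × Int)) : List (String × Int × String × Int) :=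
  (matchgrp.foldl pvStepB PySem.Dict.empty).items

-- ===== PRECONDITION & SPEC =====
def Spec_one_match (matchgrp : List (Int × String × Int)) (out : List (String × Int × String × Int)) : Prop := out = one_match_alt matchgrp
instance (matchgrp : List (Int × String × Int)) (out : List (String × Int × String × Int)) : Decidable (Spec_one_match matchgrp out) := by unfold Spec_one_match; infer_instance

-- ===== CLAIM (what is proved, stated in full; the proofs are below) =====
def Claim_equal_one_match : Prop := ∀ (matchgrp : List (Int × String × Int)), Dom_one_match matchgrp → Spec_one_match matchgrp (one_match matchgrp)

-- ===== LEMMAS AND PROOFS =====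

-- appending one element to a nonempty list updates its min exactly by B's strict-< rule
lemma pvMinBy_append (l : List (Int × String × Int)) (sr : Int × String × Int) (h : l ≠ []) :
    pvMinBy (l ++ [sr]) = if sr.2.2 < (pvMinBy l).2.2 then sr else pvMinBy l := by
  have hne : PySem.List.min? l (fun x => x.2.2) ≠ none := by
    simpa [PySem.List.min?_eq_none_iff] using h
  obtain ⟨m0, hm0⟩ := Option.ne_none_iff_exists'.mp hne
  have hmin : PySem.List.min? (l ++ [sr]) (fun x : Int × String × Int => x.2.2)
      = if sr.2.2 < m0.2.2 then some sr else some m0 := by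
    simp only [PySem.List.min?, List.foldl_append] at hm0 ⊢
    rw [hm0]
    simp
  by_cases hc : sr.2.2 < m0.2.2 <;> simp [pvMinBy, hmin, hm0, hc]

-- an item whose key looks up to l0 IS (key, l0) when keys are Nodup
lemma pvItemEq (gA : PySem.Dict String (List (Int × String × Int))) (hnd : gA.keys.Nodup)
    {p : String × List (Int × String × Int)} (hp : p ∈ gA.items)
    {l0 : List (Int × String × Int)} (hg : gA.get? p.1 = some l0) : p = (p.1, l0) := by
  have h1 : gA.get? p.1 = some p.2 :=
    PySem.Dict.get?_of_mem_items gA (by simpa using hp) hnd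
  rw [hg] at h1
  exact Prod.ext rfl (Option.some.inj h1).symm

lemma pvInvariant (l : List (Int × String × Int)) :
    ∀ (gA : PySem.Dict String (List (Int × String × Int)))
      (bB : PySem.Dict String (Int × String × Int)),
      gA.keys.Nodup →
      (∀ p ∈ gA.items, p.2 ≠ []) →
      gA.items.map (fun p => (p.1, pvMinBy p.2)) = bB.items →
      (l.foldl pvStepA gA).items.map (fun p => (p.1, pvMinBy p.2))
        = (l.foldl pvStepB bB).items := by
  induction l with
  | nil => intro gA bB _ _ h; simpa using h
  | cons sr t ih =>
    intro gA bB hnd hne hrel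
    have hkeys : bB.keys = gA.keys := by
      have := congrArg (List.map Prod.fst) hrel
      simpa [PySem.Dict.keys, List.map_map, Function.comp] using this.symm
    have hndB : bB.keys.Nodup := hkeys ▸ hnd
    simp only [List.foldl_cons]
    cases hg : gA.get? sr.2.1 with
    | none =>
      -- fresh key: both sides append
      have hcA : gA.contains sr.2.1 = false := by
        rw [PySem.Dict.contains_eq_isSome_get?, hg]; rfl
      have hcB : bB.contains sr.2.1 = false := by
        rw [PySem.Dict.contains_eq_decide_mem_keys, hkeys,
          ← PySem.Dict.contains_eq_decide_mem_keys]; exact hcA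
      have hgB : bB.get? sr.2.1 = none := by
        have h := PySem.Dict.contains_eq_isSome_get? bB sr.2.1
        rw [hcB] at h
        cases h2 : bB.get? sr.2.1 with
        | none => rfl
        | some v => rw [h2] at h; simp at h
      have h0 : gA.getD sr.2.1 [] = [] := PySem.Dict.getD_of_not_contains gA [] hcA
      have hA : pvStepA gA sr = gA.insert sr.2.1 [sr] := by
        unfold pvStepA; rw [h0]; simp
      have hB : pvStepB bB sr = bB.insert sr.2.1 sr := by
        simp [pvStepB, hgB]
      rw [hA, hB]
      apply ih
      · exact PySem.Dict.nodup_keys_insert _ _ _ hnd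
      · intro p hp
        rcases (PySem.Dict.mem_items_insert _ _ _ _).mp hp with h1 | h2
        · subst h1; simp
        · exact hne p h2.1
      · rw [PySem.Dict.items_insert_of_not_contains gA [sr] hcA,
          PySem.Dict.items_insert_of_not_contains bB sr hcB]
        rw [List.map_append, hrel]
        simp [pvMinBy, PySem.List.min?]
    | some l0 =>
      have hmem : (sr.2.1, l0) ∈ gA.items := PySem.Dict.mem_items_of_get?_eq_some gA hg
      have hl0 : l0 ≠ [] := hne _ hmem
      have hcA : gA.contains sr.2.1 = true := by
        rw [PySem.Dict.contains_eq_isSome_get?, hg]; rfl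
      have hcB : bB.contains sr.2.1 = true := by
        rw [PySem.Dict.contains_eq_decide_mem_keys, hkeys,
          ← PySem.Dict.contains_eq_decide_mem_keys]; exact hcA
      have hmemB : (sr.2.1, pvMinBy l0) ∈ bB.items := by
        rw [← hrel]
        exact List.mem_map.mpr ⟨(sr.2.1, l0), hmem, rfl⟩
      have hgB : bB.get? sr.2.1 = some (pvMinBy l0) :=
        PySem.Dict.get?_of_mem_items bB hmemB hndB
      have hA : pvStepA gA sr = gA.insert sr.2.1 (l0 ++ [sr]) := by
        unfold pvStepA
        rw [PySem.Dict.getD_of_get?_eq_some gA [] hg]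
        simp [hl0]
      rw [hA]
      by_cases hlt : sr.2.2 < (pvMinBy l0).2.2
      · have hB : pvStepB bB sr = bB.insert sr.2.1 sr := by
          simp [pvStepB, hgB, hlt]
        rw [hB]
        apply ih
        · exact PySem.Dict.nodup_keys_insert _ _ _ hnd
        · intro p hp
          rcases (PySem.Dict.mem_items_insert _ _ _ _).mp hp with h1 | h2
          · subst h1; simp
          · exact hne p h2.1
        · rw [PySem.Dict.items_insert_of_contains gA (l0 ++ [sr]) hcA,
            PySem.Dict.items_insert_of_contains bB sr hcB, ← hrel,
            List.map_map, List.map_map]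
          apply List.map_congr_left
          intro p hp
          by_cases hpk : p.1 = sr.2.1
          · have hpeq : p = (sr.2.1, l0) := by
              have := pvItemEq gA hnd hp (l0 := l0) (by rw [hpk, hg])
              rw [this, hpk]
            subst hpeq
            simp [Function.comp, pvMinBy_append _ _ hl0, hlt]
          · simp [Function.comp, hpk]
      · have hB : pvStepB bB sr = bB := by
          simp [pvStepB, hgB, hlt]
        rw [hB]
        apply ih
        · exact PySem.Dict.nodup_keys_insert _ _ _ hnd
        · intro p hp
          rcases (PySem.Dict.mem_items_insert _ _ _ _).mp hp with h1 | h2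
          · subst h1; simp [hl0]
          · exact hne p h2.1
        · rw [PySem.Dict.items_insert_of_contains gA (l0 ++ [sr]) hcA,
            List.map_map, ← hrel]
          apply List.map_congr_left
          intro p hp
          by_cases hpk : p.1 = sr.2.1
          · have hpeq : p = (sr.2.1, l0) := by
              have := pvItemEq gA hnd hp (l0 := l0) (by rw [hpk, hg])
              rw [this, hpk]
            subst hpeq
            simp [Function.comp, pvMinBy_append _ _ hl0, hlt]
          · simp [Function.comp, hpk]

-- ===== VERDICT (by name: the statement is the Claim_ definition above) =====
theorem one_match_spec : Claim_equal_one_match := by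
  intro matchgrp _
  unfold Spec_one_match one_match one_match_alt
  exact pvInvariant matchgrp PySem.Dict.empty PySem.Dict.empty
    (by simp [PySem.Dict.keys, PySem.Dict.empty]) (by simp [PySem.Dict.empty]) rfl
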